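-- pv_equiv track=rewrite | github.com/Jaxwood/special-palm-tree | src/day01.py | floors
-- ===== SOURCE A (Python) =====
-- def floors(str):
--     """find the end floor"""
--     floor = 0
--     for i in str:
--         if i == '(':
--             floor += 1
--         else:
--             floor -= 1
--     return floor
-- ===== SOURCE B (Python) =====
-- def floors(str):
--     """find the end floor"""
--     return 2 * str.count('(') - len(str)
-- ===== Notes on version B (the rewrite author's own statement) =====
-- stated objective: faster
-- what changed: Replaces the per-character loop and branch with a closed form: count the opening parentheses once via str.count and return 2*count - len(str).
import Mathlib
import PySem

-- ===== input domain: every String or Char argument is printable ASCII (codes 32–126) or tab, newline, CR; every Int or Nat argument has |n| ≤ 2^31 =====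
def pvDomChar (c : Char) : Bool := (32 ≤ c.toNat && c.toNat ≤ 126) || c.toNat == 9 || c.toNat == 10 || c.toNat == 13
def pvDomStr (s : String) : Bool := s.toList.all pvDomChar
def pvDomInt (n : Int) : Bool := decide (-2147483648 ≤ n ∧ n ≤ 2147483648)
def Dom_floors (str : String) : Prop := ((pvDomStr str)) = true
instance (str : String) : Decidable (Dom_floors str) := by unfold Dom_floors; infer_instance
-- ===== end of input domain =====

-- B replaces A's per-character loop/branch with the closed form 2*count('(') - len(str); same value on every input.

-- ===== PORT A =====
-- loop: for i in str: floor += 1 if i == '(' else floor -= 1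
def floors (str : String) : Int :=
  str.toList.foldl (fun floor i => if i == '(' then floor + 1 else floor - 1) 0

-- ===== PORT B =====
def floors_alt (str : String) : Int :=
  2 * (PySem.Str.count str "(" : Int) - PySem.Str.len str

-- ===== PRECONDITION & SPEC =====
def Spec_floors (str : String) (out : Int) : Prop := out = floors_alt str
instance (str : String) (out : Int) : Decidable (Spec_floors str out) := by unfold Spec_floors; infer_instance

-- ===== CLAIM (what is proved, stated in full; the proofs are below) =====
def Claim_equal_floors : Prop := ∀ (str : String), Dom_floors str → Spec_floors str (floors str)

-- ===== LEMMAS AND PROOFS =====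

-- single-character substring count is the character count
theorem chars_count_go_single (c : Char) (l : List Char) : ∀ (fuel acc : Nat),
    l.length ≤ fuel → PySem.Chars.count.go [c] fuel l acc = acc + l.count c := by
  induction l with
  | nil =>
    intro fuel acc _
    cases fuel <;> simp [PySem.Chars.count.go]
  | cons h t ih =>
    intro fuel acc hle
    cases fuel with
    | zero => simp at hle
    | succ n =>
      rw [PySem.Chars.count.go]
      simp only [List.isPrefixOf, List.length_cons] at *
      by_cases hc : h = c
      · subst hc
        simp only [BEq.rfl, Bool.true_and, if_pos, List.length_nil, Nat.zero_add,
          List.drop_one, List.tail_cons]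
        rw [ih n (acc + 1) (by omega)]
        simp [List.count_cons]
        omega
      · have hbe : (c == h) = false := by simp [BEq.symm_false]; exact fun e => hc e.symm
        simp only [hbe, Bool.false_and, if_neg Bool.false_ne_true]
        rw [ih n acc (by omega)]
        simp [List.count_cons, hc]

theorem str_count_single (s : String) :
    PySem.Str.count s "(" = s.toList.count '(' := by
  have h : ("(" : String).toList = ['('] := by decide
  rw [PySem.Str.count_eq, h]
  unfold PySem.Chars.count
  rw [if_neg (by decide), chars_count_go_single '(' s.toList s.toList.length 0 le_rfl]
  simp

theorem floors_foldl (l : List Char) : ∀ (a : Int),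
    l.foldl (fun floor i => if i == '(' then floor + 1 else floor - 1) a
      = a + 2 * (l.count '(' : Int) - l.length := by
  induction l with
  | nil => intro a; simp
  | cons h t ih =>
    intro a
    by_cases hc : h = '('
    · subst hc
      simp only [List.foldl_cons, BEq.rfl, if_pos, ih, List.count_cons, List.length_cons]
      push_cast
      ring
    · have hbe : (h == '(') = false := by simp [hc]
      simp only [List.foldl_cons, hbe, Bool.false_ne_true, if_neg, ih,
        List.count_cons, List.length_cons, hc]
      have hcnt : ('(' == h) = false := by simp; exact fun e => hc e.symm
      simp [hcnt]
      push_cast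
      ring

-- ===== VERDICT (by name: the statement is the Claim_ definition above) =====
theorem floors_spec : Claim_equal_floors := by
  intro str _
  unfold Spec_floors floors floors_alt
  rw [floors_foldl, str_count_single, PySem.Str.len_eq]
  simp
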